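-- pv_equiv track=rewrite | github.com/lucasbbs/Projeto-3 | main.py | printMedoid
-- ===== SOURCE A (Python) =====
-- def printMedoid(files):
--     arr = [(i[0], i[1]) for i in files]
--     results = []
--     for n in arr:
--         for m in arr:
--             results.append((n[0], sum([abs(l - k) for l, k in zip(n[1], m[1])])))
--     returns = []
--     for n in arr:
--         returns.append((n[0], ([m[1] for m in results if m[0] == n[0]])))
--     return returns
-- ===== SOURCE B (Python) =====
-- def printMedoid(files):
--     def id_block(fid):
--         # concatenated L1 distances of every row carrying this id to every row, row order
--         return [sum(abs(a - b) for a, b in zip(v, w))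
--                 for f2, v in files if f2 == fid
--                 for _, w in files]
--     cache = {}
--     out = []
--     for fid, _ in files:
--         if fid not in cache:
--             cache[fid] = id_block(fid)
--         out.append((fid, list(cache[fid])))
--     return out
-- ===== Notes on version B (the rewrite author's own statement) =====
-- stated objective: faster
-- what changed: B never builds A's flat N^2 (id,distance) list nor regroups it: it computes, once per DISTINCT id, the concatenated distance block of that id's rows against all rows, memoizes it in a dict, and emits it for every row with that id, so duplicate-id rows share one computation and the O(N^3) rescans disappear.
import Mathlib
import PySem

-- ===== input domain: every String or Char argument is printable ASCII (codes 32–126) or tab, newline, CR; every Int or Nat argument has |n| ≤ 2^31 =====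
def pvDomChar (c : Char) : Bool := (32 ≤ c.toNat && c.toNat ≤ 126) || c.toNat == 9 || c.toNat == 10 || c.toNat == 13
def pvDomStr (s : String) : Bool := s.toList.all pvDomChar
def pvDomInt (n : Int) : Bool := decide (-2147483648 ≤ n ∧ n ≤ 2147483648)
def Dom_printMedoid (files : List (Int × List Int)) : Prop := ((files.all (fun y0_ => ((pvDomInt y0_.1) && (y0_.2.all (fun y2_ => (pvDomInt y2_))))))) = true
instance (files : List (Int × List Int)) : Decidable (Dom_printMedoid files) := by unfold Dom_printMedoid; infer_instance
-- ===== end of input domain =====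

-- B computes each distinct id's concatenated distance block once (memoized per id) instead of
-- A's flat N^2 pair list plus a per-row regrouping rescan (objective: faster, asymptotic).

-- ===== PORT A =====
def printMedoid (files : List (Int × List Int)) : List (Int × List Int) :=
  let arr := files.map (fun i => (i.1, i.2))
  let results := arr.foldl (fun res n =>
    arr.foldl (fun res m =>
      res ++ [(n.1, ((n.2.zip m.2).map (fun lk => |lk.1 - lk.2|)).sum)]) res) []
  arr.foldl (fun ret n =>
    ret ++ [(n.1, (results.filter (fun m => m.1 == n.1)).map (fun m => m.2))]) []

-- ===== PORT B =====
-- Source B's id_block helper: distances of every row carrying id fid to every row.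
def pvIdBlock (files : List (Int × List Int)) (fid : Int) : List Int :=
  (files.filter (fun p => p.1 == fid)).flatMap (fun p =>
    files.map (fun q => ((p.2.zip q.2).map (fun ab => |ab.1 - ab.2|)).sum))

def printMedoid_alt (files : List (Int × List Int)) : List (Int × List Int) :=
  (files.foldl (fun st p =>
      let cache := if st.1.contains p.1 then st.1 else st.1.insert p.1 (pvIdBlock files p.1)
      (cache, st.2 ++ [(p.1, cache.getD p.1 [])]))
    ((PySem.Dict.empty : PySem.Dict Int (List Int)), [])).2

-- ===== PRECONDITION & SPEC =====
def Spec_printMedoid (files : List (Int × List Int)) (out : List (Int × List Int)) : Prop := out = printMedoid_alt files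
instance (files : List (Int × List Int)) (out : List (Int × List Int)) : Decidable (Spec_printMedoid files out) := by unfold Spec_printMedoid; infer_instance

-- ===== CLAIM (what is proved, stated in full; the proofs are below) =====
def Claim_equal_printMedoid : Prop := ∀ (files : List (Int × List Int)), Dom_printMedoid files → Spec_printMedoid files (printMedoid files)

-- ===== LEMMAS AND PROOFS =====

-- B's memo loop: provided every cached id maps to its block, the output side of the
-- fold appends one (id, block) pair per row.
theorem alt_loop (files l : List (Int × List Int)) (g : PySem.Dict Int (List Int))
    (acc : List (Int × List Int))
    (hg : ∀ k, g.contains k = true → g.getD k [] = pvIdBlock files k) :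
    (l.foldl (fun st p =>
        let cache := if st.1.contains p.1 then st.1 else st.1.insert p.1 (pvIdBlock files p.1)
        (cache, st.2 ++ [(p.1, cache.getD p.1 [])])) (g, acc)).2
      = acc ++ l.map (fun p => (p.1, pvIdBlock files p.1)) := by
  induction l generalizing g acc with
  | nil => simp
  | cons hd tl ih =>
    simp only [List.foldl_cons, List.map_cons]
    set cache := if g.contains hd.1 then g else g.insert hd.1 (pvIdBlock files hd.1) with hc
    have hcache : ∀ k, cache.contains k = true → cache.getD k [] = pvIdBlock files k := by
      intro k hk
      by_cases hgc : g.contains hd.1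
      · rw [hc, if_pos hgc] at hk ⊢
        exact hg k hk
      · rw [hc, if_neg hgc] at hk ⊢
        rw [PySem.Dict.getD_insert]
        rw [PySem.Dict.contains_insert] at hk
        by_cases hke : k = hd.1
        · simp [hke]
        · simp only [if_neg hke]
          apply hg
          simpa [hke] using hk
    have hself : cache.contains hd.1 = true := by
      rw [hc]
      split
      · assumption
      · simp
    rw [ih cache _ hcache, hcache hd.1 hself]
    simp

-- Filtering A's row-major results list by id k keeps exactly the full blocks of rows with id k.
theorem filter_results {α β γ : Type} (f : α → Int) (g : α → β → γ)
    (outer : List α) (inner : List β) (k : Int) :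
    ((outer.flatMap (fun n => inner.map (fun m => (f n, g n m)))).filter
        (fun m => m.1 == k)).map (fun m => m.2)
      = (outer.filter (fun n => f n == k)).flatMap (fun n => inner.map (g n)) := by
  induction outer with
  | nil => simp
  | cons hd tl ih =>
    simp only [List.flatMap_cons, List.filter_append, List.map_append, List.filter_cons, ih]
    by_cases h : f hd = k
    · simp [h, List.filter_map, Function.comp_def, List.map_map]
    · simp [h, List.filter_map, Function.comp_def]

-- ===== VERDICT (by name: the statement is the Claim_ definition above) =====
theorem printMedoid_spec : Claim_equal_printMedoid := by
  intro files _
  show _ = _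
  unfold printMedoid printMedoid_alt
  rw [alt_loop files files PySem.Dict.empty [] (by intro k hk; simp at hk)]
  simp only [Prod.mk.eta, List.map_id_fun', id_eq,
    PySem.List.foldl_append_singleton_eq_map, PySem.List.foldl_append_eq_flatMap,
    List.nil_append]
  refine List.map_congr_left (fun n _ => ?_)
  unfold pvIdBlock
  congr 1
  rw [← filter_results (fun n => n.1)
    (fun n m => ((n.2.zip m.2).map (fun lk => |lk.1 - lk.2|)).sum) files files n.1]
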